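-- pv_equiv track=rewrite | github.com/dunnowhattogive/Advent-Of-Code | 2025/Day5/puzzle10.py | parse_ranges_section
-- ===== SOURCE A (Python) =====
-- def parse_ranges_section(lines):
-- 	# split at first blank line
-- 	sep = None
-- 	for i, ln in enumerate(lines):
-- 		if ln.strip() == '':
-- 			sep = i
-- 			break
-- 	if sep is None:
-- 		section = [ln.strip() for ln in lines if ln.strip() != '']
-- 	else:
-- 		section = [ln.strip() for ln in lines[:sep] if ln.strip() != '']
-- 	return section
-- ===== SOURCE B (Python) =====
-- def parse_ranges_section(lines):
-- 	section = []
-- 	for ln in lines: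
-- 		s = ln.strip()
-- 		if s == '':
-- 			break
-- 		section.append(s)
-- 	return section
-- ===== Notes on version B (the rewrite author's own statement) =====
-- stated objective: simpler
-- what changed: Single pass that strips each line and breaks at the first blank, replacing the find-separator-index pass plus slice-filter-map comprehension and the 'sep is None' branch.
import Mathlib
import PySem

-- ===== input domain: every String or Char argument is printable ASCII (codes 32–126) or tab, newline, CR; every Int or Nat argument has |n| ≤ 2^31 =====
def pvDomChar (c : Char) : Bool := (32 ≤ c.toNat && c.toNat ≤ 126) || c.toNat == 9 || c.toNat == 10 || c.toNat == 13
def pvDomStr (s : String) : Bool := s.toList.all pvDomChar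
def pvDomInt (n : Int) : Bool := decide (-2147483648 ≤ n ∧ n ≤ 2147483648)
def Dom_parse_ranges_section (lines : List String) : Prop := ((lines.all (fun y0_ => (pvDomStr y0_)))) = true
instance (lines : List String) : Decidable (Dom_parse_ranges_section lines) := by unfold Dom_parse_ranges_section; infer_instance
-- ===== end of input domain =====

-- ===== PORT A =====
-- B replaces A's find-separator-then-slice structure with a single stripping pass that stops at the first blank line (objective: simpler).
-- helper: the enumerate loop locating the first blank (stripped-empty) line
def pvFindSep : List String → Nat → Option Nat
  | [], _ => none
  | ln :: rest, i => if PySem.Str.strip ln == "" then some i else pvFindSep rest (i + 1)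

def parse_ranges_section (lines : List String) : List String :=
  let sep := pvFindSep lines 0
  match sep with
  | none => (lines.filter (fun ln => PySem.Str.strip ln != "")).map PySem.Str.strip
  | some s =>
      ((PySem.List.slice lines none (some (Int.ofNat s))).filter
        (fun ln => PySem.Str.strip ln != "")).map PySem.Str.strip

-- ===== PORT B =====
def parse_ranges_section_alt (lines : List String) : List String :=
  match lines with
  | [] => []
  | ln :: rest =>
      let s := PySem.Str.strip ln
      if s == "" then [] else s :: parse_ranges_section_alt rest

-- ===== PRECONDITION & SPEC =====
def Spec_parse_ranges_section (lines : List String) (out : List String) : Prop := out = parse_ranges_section_alt lines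
instance (lines : List String) (out : List String) : Decidable (Spec_parse_ranges_section lines out) := by unfold Spec_parse_ranges_section; infer_instance

-- ===== CLAIM (what is proved, stated in full; the proofs are below) =====
def Claim_equal_parse_ranges_section : Prop := ∀ (lines : List String), Dom_parse_ranges_section lines → Spec_parse_ranges_section lines (parse_ranges_section lines)

-- ===== LEMMAS AND PROOFS =====
theorem pvFindSep_shift (rest : List String) (i : Nat) :
    pvFindSep rest (i + 1) = Option.map (· + 1) (pvFindSep rest i) := by
  induction rest generalizing i with
  | nil => rfl
  | cons ln rest ih =>
    simp only [pvFindSep]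
    split_ifs <;> simp [ih]

theorem parse_ranges_section_eq_alt (lines : List String) :
    parse_ranges_section lines = parse_ranges_section_alt lines := by
  induction lines with
  | nil => rfl
  | cons ln rest ih =>
    by_cases hb : (PySem.Str.strip ln == "") = true
    · have h0 : PySem.List.slice (ln :: rest) none (some (Int.ofNat 0)) = List.take 0 (ln :: rest) :=
        PySem.List.slice_to_natCast (ln :: rest) 0
      simp only [parse_ranges_section, parse_ranges_section_alt, pvFindSep, if_pos hb, h0,
        List.take_zero, List.filter_nil, List.map_nil]
    · have hpred : (PySem.Str.strip ln != "") = true := by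
        simp [bne, hb]
      simp only [parse_ranges_section, parse_ranges_section_alt, pvFindSep, if_neg hb,
        pvFindSep_shift rest 0]
      cases hsep : pvFindSep rest 0 with
      | none =>
        simp only [parse_ranges_section, hsep] at ih
        simp only [Option.map_none]
        rw [List.filter_cons_of_pos (p := fun l => PySem.Str.strip l != "") hpred, List.map_cons, ih]
      | some s =>
        simp only [parse_ranges_section, hsep] at ih
        have hs0 : PySem.List.slice rest none (some (Int.ofNat s)) = List.take s rest :=
          PySem.List.slice_to_natCast rest s
        rw [hs0] at ih
        have hs1 : PySem.List.slice (ln :: rest) none (some (Int.ofNat (s + 1)))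
            = List.take (s + 1) (ln :: rest) := PySem.List.slice_to_natCast (ln :: rest) (s + 1)
        simp only [Option.map_some]
        rw [hs1, List.take_succ_cons, List.filter_cons_of_pos (p := fun l => PySem.Str.strip l != "") hpred, List.map_cons, ih]

-- ===== VERDICT (by name: the statement is the Claim_ definition above) =====
theorem parse_ranges_section_spec : Claim_equal_parse_ranges_section := by
  intro lines _
  unfold Spec_parse_ranges_section
  exact parse_ranges_section_eq_alt lines
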